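-- pv_equiv track=rewrite | github.com/RishitaUikey/Basic-python | Assignment/List/182.py | max_min_sum_sublist
-- ===== SOURCE A (Python) =====
-- def max_min_sum_sublist(list_of_lists):
--     max_sum_sublist = None
--     min_sum_sublist = None
--     max_sum = float('-inf')
--     min_sum = float('inf')
--
--     for sublist in list_of_lists:
--         sublist_sum = sum(sublist)
--         if sublist_sum > max_sum:
--             max_sum = sublist_sum
--             max_sum_sublist = sublist
--         if sublist_sum < min_sum:
--             min_sum = sublist_sum
--             min_sum_sublist = sublist
--
--     return max_sum_sublist, min_sum_sublist
-- ===== SOURCE B (Python) =====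
-- def max_min_sum_sublist(list_of_lists):
--     asc = sorted(list_of_lists, key=sum)
--     if not asc:
--         return None, None
--     desc = sorted(list_of_lists, key=sum, reverse=True)
--     return desc[0], asc[0]
-- ===== Notes on version B (the rewrite author's own statement) =====
-- stated objective: alternative
-- what changed: Replaces A's single scan with four running state variables by a sort-then-pick algorithm: stable-sort the sublists by sum ascending and descending and take the heads; Python's stable sort (reverse=True keeps original order among equal keys) makes each head the FIRST extremal sublist, matching A's strict first-wins tie-breaking.
import Mathlib
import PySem

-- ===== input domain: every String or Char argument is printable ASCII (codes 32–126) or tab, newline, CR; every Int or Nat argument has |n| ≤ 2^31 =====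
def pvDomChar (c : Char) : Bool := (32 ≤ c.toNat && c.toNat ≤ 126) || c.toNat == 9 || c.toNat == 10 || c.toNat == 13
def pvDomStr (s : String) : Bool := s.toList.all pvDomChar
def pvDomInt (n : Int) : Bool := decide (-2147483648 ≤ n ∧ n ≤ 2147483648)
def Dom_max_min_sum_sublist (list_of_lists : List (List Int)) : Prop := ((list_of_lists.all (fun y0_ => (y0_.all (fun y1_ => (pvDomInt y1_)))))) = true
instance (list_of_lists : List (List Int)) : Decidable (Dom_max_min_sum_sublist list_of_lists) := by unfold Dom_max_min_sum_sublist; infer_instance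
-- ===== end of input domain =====

-- B replaces A's one-pass four-variable scan by a sort-then-pick algorithm: stable-sort
-- the sublists by sum ascending and descending and take the heads (same tie-breaking).


-- ===== PORT A =====
-- A's loop state: (max_sum_sublist, min_sum_sublist, max_sum, min_sum); the float
-- sentinels float('-inf') / float('inf') are modelled exactly by Option Int 'none'
-- (none compares below / above every integer sum, as the infinities do).
def pvStepA (st : Option (List Int) × Option (List Int) × Option Int × Option Int)
    (sublist : List Int) : Option (List Int) × Option (List Int) × Option Int × Option Int :=
  let sublist_sum := sublist.sum
  let (max_sub, min_sub, max_sum, min_sum) := st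
  let (max_sub, max_sum) :=
    if (match max_sum with | none => true | some m => decide (m < sublist_sum)) then
      (some sublist, some sublist_sum) else (max_sub, max_sum)
  let (min_sub, min_sum) :=
    if (match min_sum with | none => true | some m => decide (sublist_sum < m)) then
      (some sublist, some sublist_sum) else (min_sub, min_sum)
  (max_sub, min_sub, max_sum, min_sum)

def max_min_sum_sublist (list_of_lists : List (List Int)) : Option (List Int) × Option (List Int) :=
  let st := list_of_lists.foldl pvStepA (none, none, none, none)
  (st.1, st.2.1)

-- ===== PORT B =====
-- Source B: asc = sorted(lol, key=sum); if not asc: return None, None;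
--       desc = sorted(lol, key=sum, reverse=True); return desc[0], asc[0]
def max_min_sum_sublist_alt (list_of_lists : List (List Int)) : Option (List Int) × Option (List Int) :=
  let asc := PySem.List.sorted list_of_lists (fun s => s.sum) false
  match asc with
  | [] => (none, none)
  | mn :: _ =>
    let desc := PySem.List.sorted list_of_lists (fun s => s.sum) true
    (PySem.List.pyGet? desc 0, some mn)

-- ===== PRECONDITION & SPEC =====
def Spec_max_min_sum_sublist (list_of_lists : List (List Int)) (out : Option (List Int) × Option (List Int)) : Prop := out = max_min_sum_sublist_alt list_of_lists
instance (list_of_lists : List (List Int)) (out : Option (List Int) × Option (List Int)) : Decidable (Spec_max_min_sum_sublist list_of_lists out) := by unfold Spec_max_min_sum_sublist; infer_instance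

-- ===== CLAIM =====
def Claim_equal_max_min_sum_sublist : Prop := ∀ (list_of_lists : List (List Int)), Dom_max_min_sum_sublist list_of_lists → Spec_max_min_sum_sublist list_of_lists (max_min_sum_sublist list_of_lists)

-- ===== LEMMAS AND PROOFS =====

-- Running first-extremum steps (what A's packed loop computes for each of its two halves).
def pvStepMax (acc : Option (List Int)) (x : List Int) : Option (List Int) :=
  match acc with
  | none => some x
  | some m => if m.sum < x.sum then some x else some m

def pvStepMin (acc : Option (List Int)) (x : List Int) : Option (List Int) :=
  match acc with
  | none => some x
  | some m => if x.sum < m.sum then some x else some m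

-- Invariant: A's packed state is (a, b, a.map sum, b.map sum) throughout the loop.
theorem pv_loop_inv (xs : List (List Int)) (a b : Option (List Int)) :
    xs.foldl pvStepA (a, b, a.map List.sum, b.map List.sum) =
      (xs.foldl pvStepMax a, xs.foldl pvStepMin b,
       (xs.foldl pvStepMax a).map List.sum, (xs.foldl pvStepMin b).map List.sum) := by
  induction xs generalizing a b with
  | nil => simp [List.foldl]
  | cons x t ih =>
    have hstep : pvStepA (a, b, a.map List.sum, b.map List.sum) x =
        (pvStepMax a x, pvStepMin b x,
         (pvStepMax a x).map List.sum, (pvStepMin b x).map List.sum) := by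
      cases a <;> cases b <;>
        simp [pvStepA, pvStepMax, pvStepMin] <;> split_ifs <;> simp
    simp only [List.foldl, hstep]
    exact ih _ _

-- Head of an insertBy insertion: x lands at the head iff 'before x (old head)'.
theorem pv_head?_insertBy (before : List Int → List Int → Bool) (x : List Int)
    (ys : List (List Int)) :
    (PySem.List.insertBy before x ys).head? =
      match ys with
      | [] => some x
      | y :: _ => if before x y then some x else some y := by
  cases ys with
  | nil => rfl
  | cons y t => simp only [PySem.List.insertBy]; split_ifs <;> rfl

-- Head of the insertion-sort fold equals the running first-extremum fold on heads.
theorem pv_head?_foldl_insertBy (before : List Int → List Int → Bool)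
    (xs : List (List Int)) (acc : List (List Int)) :
    (xs.foldl (fun acc x => PySem.List.insertBy before x acc) acc).head? =
      xs.foldl (fun m x =>
        match m with
        | none => some x
        | some h => if before x h then some x else some h) acc.head? := by
  induction xs generalizing acc with
  | nil => rfl
  | cons x t ih =>
    simp only [List.foldl]
    rw [ih]
    congr 1
    rw [pv_head?_insertBy]
    cases acc <;> rfl

-- Head of the ascending stable sort = A's min half.
theorem pv_sorted_head_min (xs : List (List Int)) :
    (PySem.List.sorted xs (fun s => s.sum) false).head? = xs.foldl pvStepMin none := by
  rw [PySem.List.sorted_eq_foldl_insertBy,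
      pv_head?_foldl_insertBy (fun a b => decide (a.sum < b.sum)) xs []]
  congr 1
  funext m x
  cases m <;> simp [pvStepMin]

-- Head of the descending stable sort = A's max half.
theorem pv_sorted_head_max (xs : List (List Int)) :
    (PySem.List.sorted xs (fun s => s.sum) true).head? = xs.foldl pvStepMax none := by
  rw [PySem.List.sorted_rev_eq_foldl_insertBy,
      pv_head?_foldl_insertBy (fun a b => decide (b.sum < a.sum)) xs []]
  congr 1
  funext m x
  cases m <;> simp [pvStepMax]

theorem pv_pyGet?_zero (xs : List (List Int)) : PySem.List.pyGet? xs 0 = xs.head? := by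
  cases xs <;> simp [PySem.List.pyGet?, PySem.List.pyIdx?]

-- ===== VERDICT =====
theorem max_min_sum_sublist_spec : Claim_equal_max_min_sum_sublist := by
  intro lol _
  unfold Spec_max_min_sum_sublist max_min_sum_sublist max_min_sum_sublist_alt
  have h := pv_loop_inv lol none none
  simp only [Option.map_none] at h
  cases hs : PySem.List.sorted lol (fun s => s.sum) false with
  | nil =>
    have : lol = [] := (PySem.List.sorted_eq_nil_iff _ _ _).mp hs
    subst this
    simp [h]
  | cons mn rest =>
    have hm : some mn = lol.foldl pvStepMin none := by
      rw [← pv_sorted_head_min, hs]; rfl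
    have hx : PySem.List.pyGet? (PySem.List.sorted lol (fun s => s.sum) true) 0 =
        lol.foldl pvStepMax none := by
      rw [pv_pyGet?_zero, pv_sorted_head_max]
    simp [h, hx, ← hm]
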